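-- pv_equiv track=rewrite | github.com/benreynwar/fpga-sdrlib | python/fpga_sdrlib/fft/qa_fft.py | prune_zeros
-- ===== SOURCE A (Python) =====
-- def prune_zeros(xs):
--     start_index = None
--     stop_index = None
--     for i, x in enumerate(xs):
--         if x != 0:
--             if start_index is None:
--                 start_index = i
--             stop_index = i
--     if start_index is None:
--         return []
--     else:
--         return xs[start_index:stop_index+1]
-- ===== SOURCE B (Python) =====
-- def prune_zeros(xs):
--     def drop_leading(ys):
--         for k, y in enumerate(ys):
--             if y != 0:
--                 return ys[k:]
--         return []
--     return drop_leading(drop_leading(xs)[::-1])[::-1]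
-- ===== Notes on version B (the rewrite author's own statement) =====
-- stated objective: alternative
-- what changed: A's single indexed forward pass that tracks first/last nonzero indices and slices is replaced by two boundary trims: drop leading zeros, reverse, drop leading zeros, reverse.
import Mathlib
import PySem

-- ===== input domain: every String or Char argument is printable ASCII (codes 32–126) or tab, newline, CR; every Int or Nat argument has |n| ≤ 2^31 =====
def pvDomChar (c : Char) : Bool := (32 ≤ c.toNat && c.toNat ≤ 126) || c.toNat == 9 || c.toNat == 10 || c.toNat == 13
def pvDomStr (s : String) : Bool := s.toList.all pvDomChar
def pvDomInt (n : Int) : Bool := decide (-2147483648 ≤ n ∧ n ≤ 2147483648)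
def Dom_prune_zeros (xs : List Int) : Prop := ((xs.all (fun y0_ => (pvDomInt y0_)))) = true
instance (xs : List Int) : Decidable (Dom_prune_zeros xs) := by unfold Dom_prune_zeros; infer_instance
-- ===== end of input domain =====

-- B trims zeros at the two boundaries (drop leading zeros, reverse, drop leading zeros, reverse) instead of A's indexed pass + slice; same cost, different decomposition.

-- ===== PORT A =====
-- the for-loop of A over enumerate(xs), carrying (start_index, stop_index)
def pruneLoop : List Int → Nat → Option Nat → Option Nat → Option Nat × Option Nat
  | [], _, st, sp => (st, sp)
  | x :: xs, i, st, sp =>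
      if x ≠ 0 then
        pruneLoop xs (i + 1) (if st = none then some i else st) (some i)
      else
        pruneLoop xs (i + 1) st sp

def prune_zeros (xs : List Int) : List Int :=
  match pruneLoop xs 0 none none with
  | (none, _) => []
  | (some a, sp) => PySem.List.slice xs (some (a : Int)) (some ((sp.getD 0 : Int) + 1))

-- ===== PORT B =====
-- drop_leading of Source B: skip zeros, return the suffix from the first nonzero ([] if none)
def dropLead : List Int → List Int
  | [] => []
  | x :: xs => if x ≠ 0 then x :: xs else dropLead xs

def prune_zeros_alt (xs : List Int) : List Int :=
  (dropLead ((dropLead xs).reverse)).reverse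

-- ===== PRECONDITION & SPEC =====
def Spec_prune_zeros (xs : List Int) (out : List Int) : Prop := out = prune_zeros_alt xs
instance (xs : List Int) (out : List Int) : Decidable (Spec_prune_zeros xs out) := by unfold Spec_prune_zeros; infer_instance

-- ===== CLAIM (what is proved, stated in full; the proofs are below) =====
def Claim_equal_prune_zeros : Prop := ∀ (xs : List Int), Dom_prune_zeros xs → Spec_prune_zeros xs (prune_zeros xs)

-- ===== LEMMAS AND PROOFS =====

-- index of the first nonzero element (length if none)
def firstNZ : List Int → Nat
  | [] => 0
  | x :: xs => if x ≠ 0 then 0 else 1 + firstNZ xs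

-- index of the last nonzero element (meaningful when one exists)
def lastNZ : List Int → Nat
  | [] => 0
  | _ :: xs => if ∃ y ∈ xs, y ≠ 0 then 1 + lastNZ xs else 0

lemma exists_nz_tail {x : Int} {xs : List Int} (hx : x = 0)
    (h : ∃ y ∈ x :: xs, y ≠ 0) : ∃ y ∈ xs, y ≠ 0 := by
  rcases h with ⟨y, hy, hny⟩
  rcases List.mem_cons.mp hy with rfl | hy
  · exact absurd hx hny
  · exact ⟨y, hy, hny⟩

lemma pruneLoop_allzero (xs : List Int) (i : Nat) (st sp : Option Nat)
    (h : ∀ x ∈ xs, x = 0) : pruneLoop xs i st sp = (st, sp) := by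
  induction xs generalizing i with
  | nil => rfl
  | cons x xs ih =>
    have hx : x = 0 := h x (by simp)
    simp [pruneLoop, hx, ih _ (fun y hy => h y (by simp [hy]))]

lemma pruneLoop_char (xs : List Int) (i : Nat) (st sp : Option Nat)
    (h : ∃ x ∈ xs, x ≠ 0) :
    pruneLoop xs i st sp = (st.or (some (i + firstNZ xs)), some (i + lastNZ xs)) := by
  induction xs generalizing i st sp with
  | nil => simp at h
  | cons x xs ih =>
    by_cases hx : x = 0
    · have hxs : ∃ y ∈ xs, y ≠ 0 := exists_nz_tail hx h
      rw [show pruneLoop (x :: xs) i st sp = pruneLoop xs (i + 1) st sp by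
        simp [pruneLoop, hx]]
      rw [ih _ _ _ hxs]
      simp [firstNZ, lastNZ, hx, hxs]
      rw [show i + (1 + firstNZ xs) = i + 1 + firstNZ xs from by omega,
          show i + (1 + lastNZ xs) = i + 1 + lastNZ xs from by omega]
      exact ⟨rfl, rfl⟩
    · rw [show pruneLoop (x :: xs) i st sp
            = pruneLoop xs (i + 1) (if st = none then some i else st) (some i) by
        simp [pruneLoop, hx]]
      by_cases hxs : ∃ y ∈ xs, y ≠ 0
      · rw [ih _ _ _ hxs]
        simp [firstNZ, lastNZ, hx, hxs]
        constructor
        · cases st <;> simp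
        · omega
      · rw [pruneLoop_allzero xs _ _ _ (by
          intro y hy; by_contra hny; exact hxs ⟨y, hy, hny⟩)]
        simp [firstNZ, lastNZ, hx, hxs]
        cases st <;> simp

lemma dropLead_eq_drop (xs : List Int) : dropLead xs = xs.drop (firstNZ xs) := by
  induction xs with
  | nil => rfl
  | cons x xs ih =>
    by_cases hx : x = 0
    · simp [dropLead, firstNZ, hx, ih, Nat.add_comm 1]
    · simp [dropLead, firstNZ, hx]

lemma firstNZ_allzero (xs : List Int) (h : ∀ x ∈ xs, x = 0) : firstNZ xs = xs.length := by
  induction xs with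
  | nil => rfl
  | cons x xs ih =>
    have hx : x = 0 := h x (by simp)
    simp [firstNZ, hx, ih (fun y hy => h y (by simp [hy])), Nat.add_comm 1]

lemma firstNZ_append_of_any (as bs : List Int) (h : ∃ x ∈ as, x ≠ 0) :
    firstNZ (as ++ bs) = firstNZ as := by
  induction as with
  | nil => simp at h
  | cons a as ih =>
    by_cases ha : a = 0
    · have has : ∃ y ∈ as, y ≠ 0 := exists_nz_tail ha h
      simp [firstNZ, ha, ih has]
    · simp [firstNZ, ha]

lemma firstNZ_append_allzero (as : List Int) (b : Int) (bs : List Int)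
    (h : ∀ x ∈ as, x = 0) (hb : b ≠ 0) :
    firstNZ (as ++ b :: bs) = as.length := by
  induction as with
  | nil => simp [firstNZ, hb]
  | cons a as ih =>
    have ha : a = 0 := h a (by simp)
    simp [firstNZ, ha, ih (fun y hy => h y (by simp [hy])), Nat.add_comm 1]

lemma lastNZ_shift (xs : List Int) (h : ∃ x ∈ xs, x ≠ 0) :
    lastNZ xs = firstNZ xs + lastNZ (xs.drop (firstNZ xs)) := by
  induction xs with
  | nil => simp at h
  | cons x xs ih =>
    by_cases hx : x = 0
    · have hxs : ∃ y ∈ xs, y ≠ 0 := exists_nz_tail hx h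
      simp [firstNZ, lastNZ, hx, hxs, Nat.add_comm 1, List.drop_succ_cons, ih hxs]
      omega
    · simp [firstNZ, lastNZ, hx]

lemma drop_firstNZ_cons (xs : List Int) (h : ∃ x ∈ xs, x ≠ 0) :
    ∃ y t, xs.drop (firstNZ xs) = y :: t ∧ y ≠ 0 := by
  induction xs with
  | nil => simp at h
  | cons x xs ih =>
    by_cases hx : x = 0
    · have hxs : ∃ y ∈ xs, y ≠ 0 := exists_nz_tail hx h
      simpa [firstNZ, hx, Nat.add_comm 1] using ih hxs
    · exact ⟨x, xs, by simp [firstNZ, hx], hx⟩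

lemma lastNZ_rev (xs : List Int) (h : ∃ x ∈ xs, x ≠ 0) :
    lastNZ xs + 1 + firstNZ xs.reverse = xs.length := by
  induction xs with
  | nil => simp at h
  | cons x xs ih =>
    by_cases hxs : ∃ y ∈ xs, y ≠ 0
    · have : firstNZ (xs.reverse ++ [x]) = firstNZ xs.reverse :=
        firstNZ_append_of_any _ _ (by
          rcases hxs with ⟨y, hy, hny⟩; exact ⟨y, by simp [hy], hny⟩)
      simp [lastNZ, hxs, List.reverse_cons, this]
      have := ih hxs
      omega
    · have hx : x ≠ 0 := by
        rcases h with ⟨y, hy, hny⟩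
        rcases List.mem_cons.mp hy with rfl | hy
        · exact hny
        · exact absurd ⟨y, hy, hny⟩ hxs
      have hz : ∀ y ∈ xs.reverse, y = 0 := by
        intro y hy; by_contra hny
        exact hxs ⟨y, by simpa using hy, hny⟩
      simp [lastNZ, hxs, List.reverse_cons, firstNZ_append_allzero _ _ _ hz hx]
      omega

-- ===== VERDICT (by name: the statement is the Claim_ definition above) =====
theorem prune_zeros_spec : Claim_equal_prune_zeros := by
  intro xs _
  unfold Spec_prune_zeros prune_zeros prune_zeros_alt
  by_cases h : ∃ x ∈ xs, x ≠ 0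
  · rw [pruneLoop_char xs 0 none none h]
    simp only [Option.or, Option.getD]
    rcases drop_firstNZ_cons xs h with ⟨y, t, hyt, hy⟩
    have hys : ∃ z ∈ xs.drop (firstNZ xs), z ≠ 0 := ⟨y, by simp [hyt], hy⟩
    have hrev : ∃ z ∈ (xs.drop (firstNZ xs)).reverse, z ≠ 0 := by
      rcases hys with ⟨z, hz, hnz⟩; exact ⟨z, by simpa using hz, hnz⟩
    simp only [dropLead_eq_drop, Nat.zero_add]
    have hcast : ((firstNZ xs + lastNZ (xs.drop (firstNZ xs)) : Nat) : Int) + 1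
        = (((firstNZ xs + lastNZ (xs.drop (firstNZ xs)) + 1 : Nat)) : Int) := by push_cast; ring
    rw [lastNZ_shift xs h, hcast, PySem.List.slice_natCast]
    have hlen := lastNZ_rev (xs.drop (firstNZ xs)) hys
    rw [List.drop_reverse, List.reverse_reverse]
    congr 1
    simp at hlen ⊢
    omega
  · rw [pruneLoop_allzero xs 0 none none (by
      intro y hy; by_contra hny; exact h ⟨y, hy, hny⟩)]
    have hz : ∀ y ∈ xs, y = 0 := by
      intro y hy; by_contra hny; exact h ⟨y, hy, hny⟩
    simp only [dropLead_eq_drop, firstNZ_allzero xs hz, List.drop_length]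
    simp [firstNZ]
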